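-- pv_equiv track=rewrite | github.com/edyhvh/shafan | scripts/get_images_from_pdfs.py | get_missing_page_ranges
-- ===== SOURCE A (Python) =====
-- def get_missing_page_ranges(expected_pages, converted_pages):
--     """Get ranges of missing pages for efficient batch processing"""
--     if not expected_pages:
--         return []
--
--     missing_pages = sorted(set(expected_pages) - converted_pages)
--     if not missing_pages:
--         return []
--
--     # Convert to ranges
--     ranges = []
--     start = missing_pages[0]
--     prev = missing_pages[0]
--
--     for page in missing_pages[1:]:
--         if page != prev + 1:
--             ranges.append((start, prev))
--             start = page
--         prev = page
--
--     ranges.append((start, prev))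
--     return ranges
-- ===== SOURCE B (Python) =====
-- def get_missing_page_ranges(expected_pages, converted_pages):
--     """Get ranges of missing pages for efficient batch processing"""
--     if not expected_pages:
--         return []
--
--     missing = sorted(set(expected_pages) - converted_pages)
--     if not missing:
--         return []
--
--     # A "break" is an adjacent pair of missing pages that is not consecutive;
--     # range starts are the first page plus every page right after a break,
--     # range ends are every page right before a break plus the last page.
--     breaks = [(a, b) for a, b in zip(missing, missing[1:]) if b != a + 1]
--     starts = [missing[0]] + [b for _, b in breaks]
--     ends = [a for a, _ in breaks] + [missing[-1]]
--     return list(zip(starts, ends))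
-- ===== Notes on version B (the rewrite author's own statement) =====
-- stated objective: alternative
-- what changed: Replaces the stateful start/prev accumulator loop by a declarative decomposition: collect the non-consecutive adjacent pairs ('breaks') of the sorted missing pages with zip, derive the start list and end list from them, and zip those together.
import Mathlib
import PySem

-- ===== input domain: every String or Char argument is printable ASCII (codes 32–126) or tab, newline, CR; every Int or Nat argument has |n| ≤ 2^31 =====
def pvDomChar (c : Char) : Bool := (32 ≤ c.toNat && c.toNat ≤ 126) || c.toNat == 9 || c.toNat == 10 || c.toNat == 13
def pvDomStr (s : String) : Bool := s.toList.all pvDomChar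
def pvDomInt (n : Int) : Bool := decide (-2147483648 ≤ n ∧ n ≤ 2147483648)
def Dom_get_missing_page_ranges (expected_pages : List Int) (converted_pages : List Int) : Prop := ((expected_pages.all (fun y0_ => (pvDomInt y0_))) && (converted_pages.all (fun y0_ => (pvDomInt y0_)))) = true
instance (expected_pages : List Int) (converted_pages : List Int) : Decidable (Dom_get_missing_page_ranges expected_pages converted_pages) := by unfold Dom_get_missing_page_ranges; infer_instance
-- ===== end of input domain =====

-- B replaces A's stateful start/prev loop by a declarative decomposition (breaks = non-consecutive
-- adjacent pairs; zip the derived start and end lists); objective: alternative, same cost.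

-- ===== PORT A =====
-- literal transliteration of A: the 'if not missing_pages: return []' guard and the
-- missing_pages[0] / missing_pages[1:] accesses are realised by the [] / m0 :: rest match
def get_missing_page_ranges (expected_pages : List Int) (converted_pages : List Int) : List (Int × Int) :=
  if expected_pages = [] then []
  else
    let missing_pages : List Int :=
      PySem.List.sorted (PySem.Set.diff (PySem.Set.ofList expected_pages) converted_pages) (fun x => x) false
    match missing_pages with
    | [] => []
    | m0 :: rest =>
      -- ranges = []; start = prev = missing_pages[0]; for page in missing_pages[1:]: …
      let s := rest.foldl
        (fun (st : List (Int × Int) × Int × Int) page =>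
          if page ≠ st.2.2 + 1 then (st.1 ++ [(st.2.1, st.2.2)], page, page)
          else (st.1, st.2.1, page))
        ([], m0, m0)
      s.1 ++ [(s.2.1, s.2.2)]

-- ===== PORT B =====
-- literal transliteration of Source B; missing[1:] is missing.drop 1 (PySem.List.slice_from_one),
-- missing[-1] is the last element of the (nonempty, matched) list
def get_missing_page_ranges_alt (expected_pages : List Int) (converted_pages : List Int) : List (Int × Int) :=
  if expected_pages = [] then []
  else
    let missing : List Int :=
      PySem.List.sorted (PySem.Set.diff (PySem.Set.ofList expected_pages) converted_pages) (fun x => x) false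
    match missing with
    | [] => []
    | m0 :: rest =>
      let breaks := ((m0 :: rest).zip ((m0 :: rest).drop 1)).filter (fun ab => ab.2 ≠ ab.1 + 1)
      let starts := m0 :: breaks.map Prod.snd
      let ends := breaks.map Prod.fst ++ [(m0 :: rest).getLast (by simp)]
      starts.zip ends

-- ===== PRECONDITION & SPEC =====
def Spec_get_missing_page_ranges (expected_pages : List Int) (converted_pages : List Int) (out : List (Int × Int)) : Prop := out = get_missing_page_ranges_alt expected_pages converted_pages
instance (expected_pages : List Int) (converted_pages : List Int) (out : List (Int × Int)) : Decidable (Spec_get_missing_page_ranges expected_pages converted_pages out) := by unfold Spec_get_missing_page_ranges; infer_instance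

-- ===== CLAIM (what is proved, stated in full; the proofs are below) =====
def Claim_equal_get_missing_page_ranges : Prop := ∀ (expected_pages : List Int) (converted_pages : List Int), Dom_get_missing_page_ranges expected_pages converted_pages → Spec_get_missing_page_ranges expected_pages converted_pages (get_missing_page_ranges expected_pages converted_pages)

-- ===== LEMMAS AND PROOFS =====

-- the common recursive characterisation of the range-building phase
def pvRun (start prev : Int) : List Int → List (Int × Int)
  | [] => [(start, prev)]
  | p :: ps => if p ≠ prev + 1 then (start, prev) :: pvRun p p ps else pvRun start p ps

theorem pvFold_eq_run (rest : List Int) : ∀ (ranges : List (Int × Int)) (start prev : Int),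
    (let s := rest.foldl
        (fun (st : List (Int × Int) × Int × Int) page =>
          if page ≠ st.2.2 + 1 then (st.1 ++ [(st.2.1, st.2.2)], page, page)
          else (st.1, st.2.1, page))
        (ranges, start, prev)
     s.1 ++ [(s.2.1, s.2.2)]) = ranges ++ pvRun start prev rest := by
  induction rest with
  | nil => intro ranges start prev; simp [pvRun]
  | cons p ps ih =>
    intro ranges start prev
    by_cases h : p = prev + 1
    · have h1 := ih ranges start p
      simp only [List.foldl_cons]
      simp [pvRun, h] at h1 ⊢
      exact h1
    · have h1 := ih (ranges ++ [(start, prev)]) p p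
      simp only [List.foldl_cons]
      simp [pvRun, h] at h1 ⊢
      rw [h1]

theorem pvZip_eq_run (ps : List Int) : ∀ (prev start : Int),
    (start :: (((prev :: ps).zip ps).filter (fun ab => ab.2 ≠ ab.1 + 1)).map Prod.snd).zip
      ((((prev :: ps).zip ps).filter (fun ab => ab.2 ≠ ab.1 + 1)).map Prod.fst
        ++ [(prev :: ps).getLast (by simp)])
    = pvRun start prev ps := by
  induction ps with
  | nil => intro prev start; simp [pvRun]
  | cons q qs ih =>
    intro prev start
    have hlast : (prev :: q :: qs).getLast (by simp) = (q :: qs).getLast (by simp) :=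
      List.getLast_cons (by simp)
    simp only [List.zip_cons_cons, List.filter_cons]
    by_cases h : q = prev + 1
    · simp only [pvRun]
      rw [if_neg (by simp [h])]
      have h1 := ih q start
      simp [h] at h1 ⊢
      exact h1
    · simp only [pvRun]
      rw [if_pos (by simp [h])]
      have h1 := ih q q
      simp [h, hlast] at h1 ⊢
      exact h1

-- ===== VERDICT (by name: the statement is the Claim_ definition above) =====
theorem get_missing_page_ranges_spec : Claim_equal_get_missing_page_ranges := by
  intro expected_pages converted_pages _
  unfold Spec_get_missing_page_ranges get_missing_page_ranges get_missing_page_ranges_alt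
  by_cases he : expected_pages = []
  · simp [he]
  · simp only [if_neg he]
    cases hm : PySem.List.sorted (PySem.Set.diff (PySem.Set.ofList expected_pages) converted_pages) (fun x => x) false with
    | nil => rfl
    | cons m0 rest =>
      have h1 := pvFold_eq_run rest ([] : List (Int × Int)) m0 m0
      have h2 := pvZip_eq_run rest m0 m0
      simp only [List.nil_append] at h1
      simp only [List.drop_one, List.tail_cons]
      rw [h1, ← h2]
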